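-- pv_equiv track=rewrite | github.com/leandroberto2010/AG | tp2/exhaustivo.py | exhaustivo
-- ===== SOURCE A (Python) =====
-- def powerset(list):
--     n = len(list)
--     x = 2**n
--     for i in range(1, x):
--         binary = bin(i)[2:].zfill(n)
--         subset = []
--         for j in range(n):
--             if binary[j] == '1':
--                 subset.append(list[j])
--         yield subset
--
-- def weight_and_value(set):
--     volumen_total = 0
--     valor_total = 0
--     for item in set:
--         volumen_total += item['volumen']
--         valor_total += item['valor']
--     return volumen_total, valor_total
--
-- def exhaustivo(items, capacity):
--     lista = []
--     max_value = 0
--     for set in powerset(items):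
--         volumen_total, valor_total = weight_and_value(set)
--         if volumen_total <= capacity:
--             if valor_total > max_value:
--                 max_value = valor_total
--                 lista.clear()
--                 lista.append(set)
--             elif valor_total == max_value:
--                 lista.append(set)
--     return lista
-- ===== SOURCE B (Python) =====
-- def exhaustivo(items, capacity):
--     # B: recursive powerset in binary-counting order, then two passes:
--     # collect feasible (value, subset) pairs, take the max value clamped to 0, filter.
--     def allsubs(xs):
--         if not xs:
--             return [[]]
--         rest = allsubs(xs[1:])
--         return rest + [[xs[0]] + s for s in rest]
--     feas = []
--     for s in allsubs(items)[1:]: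
--         vol = sum(it['volumen'] for it in s)
--         val = sum(it['valor'] for it in s)
--         if vol <= capacity:
--             feas.append((val, s))
--     best = max([0] + [v for v, _ in feas])
--     return [s for v, s in feas if v == best]
-- ===== Notes on version B (the rewrite author's own statement) =====
-- stated objective: alternative
-- what changed: Replaces A's single clear/append scan with running (max_value, lista) state and bin()-string subset decoding by a recursively built powerset (same enumeration order) and two passes: collect feasible (value, subset) pairs, clamp the best value to 0, then filter the ties.
import Mathlib
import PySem

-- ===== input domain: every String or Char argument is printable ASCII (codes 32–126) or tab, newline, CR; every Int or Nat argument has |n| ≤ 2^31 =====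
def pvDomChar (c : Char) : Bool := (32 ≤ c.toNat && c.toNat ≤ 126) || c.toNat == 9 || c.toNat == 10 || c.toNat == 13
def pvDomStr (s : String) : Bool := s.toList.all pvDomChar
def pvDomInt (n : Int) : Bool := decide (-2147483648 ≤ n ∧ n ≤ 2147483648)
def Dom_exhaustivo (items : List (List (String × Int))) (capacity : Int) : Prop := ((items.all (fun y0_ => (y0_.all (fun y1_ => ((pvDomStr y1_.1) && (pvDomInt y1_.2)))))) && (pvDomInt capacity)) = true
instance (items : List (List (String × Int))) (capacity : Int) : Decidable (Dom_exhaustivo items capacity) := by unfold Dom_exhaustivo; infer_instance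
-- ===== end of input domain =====

-- B re-implements the same exhaustive knapsack with a recursive powerset (same enumeration
-- order) and two passes — collect feasible (value, subset) pairs, take the max value clamped
-- to 0, filter — instead of A's single scan with a clear/append running state ('alternative').

-- ===== PORT A =====
-- bin(i)[2:] for i ≥ 1: binary digits of i, most significant first
def pvBin (i : Nat) : List Char :=
  if _h : i < 2 then [if i = 1 then '1' else '0']
  else pvBin (i / 2) ++ [if i % 2 = 1 then '1' else '0']
decreasing_by omega

-- str.zfill(n): pad with '0' on the left up to length n
def pvZfill (n : Nat) (s : List Char) : List Char :=
  List.replicate (n - s.length) '0' ++ s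

-- item['volumen'] / item['valor']: first-match dict lookup (total with default 0; a missing
-- key is a Python KeyError and those inputs are excluded by Pre_)
def pvKey (d : List (String × Int)) (k : String) : Int :=
  (PySem.Dict.mk d).getD k 0

def weight_and_value (s : List (List (String × Int))) : Int × Int :=
  s.foldl (fun acc item => (acc.1 + pvKey item "volumen", acc.2 + pvKey item "valor")) ((0:Int), (0:Int))

-- the subset powerset(items) yields for index i (binary string; item j ↔ character j)
def pvSubset (items : List (List (String × Int))) (i : Nat) : List (List (String × Int)) :=
  (List.range items.length).foldl
    (fun subset j =>
      if (pvZfill items.length (pvBin i)).getD j ' ' = '1' then subset ++ [items.getD j []]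
      else subset) []

def exhaustivo (items : List (List (String × Int))) (capacity : Int) :
    List (List (List (String × Int))) :=
  ((PySem.List.pyRange 1 ((2:Int) ^ items.length) 1).foldl
    (fun st i =>
      let s := pvSubset items i.toNat
      let wv := weight_and_value s
      if wv.1 ≤ capacity then
        if wv.2 > st.1 then (wv.2, [s])
        else if wv.2 = st.1 then (st.1, st.2 ++ [s])
        else st
      else st)
    ((0:Int), ([] : List (List (List (String × Int)))))).2

-- ===== PORT B =====
-- allsubs(xs): all subsets, binary-counting order (subsets without xs[0] first)
def pvAllsubs {α : Type} : List α → List (List α)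
  | [] => [[]]
  | x :: xs =>
    let rest := pvAllsubs xs
    rest ++ rest.map (fun s => x :: s)

def exhaustivo_alt (items : List (List (String × Int))) (capacity : Int) :
    List (List (List (String × Int))) :=
  let feas := ((pvAllsubs items).drop 1).foldl
    (fun acc s =>
      let vol := s.foldl (fun a it => a + pvKey it "volumen") 0
      let val := s.foldl (fun a it => a + pvKey it "valor") 0
      if vol ≤ capacity then acc ++ [(val, s)] else acc) []
  let best := (feas.map Prod.fst).foldl max 0
  (feas.filter (fun p => p.1 == best)).map Prod.snd

-- ===== PRECONDITION & SPEC =====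
-- Pre_ excludes inputs where some item lacks key 'volumen' or 'valor': there Python A
-- (and Python B alike) raises KeyError instead of returning.
def Pre_exhaustivo (items : List (List (String × Int))) (capacity : Int) : Prop :=
  ∀ d ∈ items, ((PySem.Dict.mk d).contains "volumen" = true) ∧ ((PySem.Dict.mk d).contains "valor" = true)
instance (items : List (List (String × Int))) (capacity : Int) : Decidable (Pre_exhaustivo items capacity) := by unfold Pre_exhaustivo; infer_instance

def pvWitness_exhaustivo : (List (List (String × Int))) × Int :=
  ([[("volumen", 2), ("valor", 3)], [("volumen", 1), ("valor", 1)]], 2)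

def Spec_exhaustivo (items : List (List (String × Int))) (capacity : Int) (out : List (List (List (String × Int)))) : Prop := out = exhaustivo_alt items capacity
instance (items : List (List (String × Int))) (capacity : Int) (out : List (List (List (String × Int)))) : Decidable (Spec_exhaustivo items capacity out) := by unfold Spec_exhaustivo; infer_instance

-- ===== CLAIM (what is proved, stated in full; the proofs are below) =====
def Claim_equal_exhaustivo : Prop := ∀ (items : List (List (String × Int))) (capacity : Int), Dom_exhaustivo items capacity → Pre_exhaustivo items capacity → Spec_exhaustivo items capacity (exhaustivo items capacity)

-- ===== LEMMAS AND PROOFS =====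

-- the binary string of i zero-filled to width n, as a map over positions
def binN (n i : Nat) : List Char :=
  (List.range n).map (fun j => if i.testBit (n - 1 - j) then '1' else '0')

-- the subset selected by index i: head of xs ↔ bit (length of tail)
def natSub {α : Type} (i : Nat) : List α → List α
  | [] => []
  | x :: xs => if i.testBit xs.length then x :: natSub i xs else natSub i xs

def wvol (s : List (List (String × Int))) : Int :=
  s.foldl (fun a it => a + pvKey it "volumen") 0

def wval (s : List (List (String × Int))) : Int :=
  s.foldl (fun a it => a + pvKey it "valor") 0

lemma natSub_nil {α : Type} (i : Nat) : natSub i ([] : List α) = [] := rfl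

lemma natSub_cons {α : Type} (i : Nat) (x : α) (xs : List α) :
    natSub i (x :: xs) = if i.testBit xs.length then x :: natSub i xs else natSub i xs := rfl

lemma binRep : ∀ (n i : Nat), 1 ≤ i → i < 2 ^ n → pvZfill n (pvBin i) = binN n i := by
  intro n
  induction n with
  | zero => intro i h1 h2; omega
  | succ m ih =>
    intro i h1 h2
    by_cases hlt : i < 2
    · have hi : i = 1 := by omega
      subst hi
      rw [pvBin]
      simp only [show (1:Nat) < 2 from by omega, dite_true]
      unfold pvZfill binN
      rw [List.range_succ, List.map_append]
      have h1m : ∀ j ∈ List.range m, (if Nat.testBit 1 (m + 1 - 1 - j) then '1' else '0') = '0' := by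
        intro j hj
        have hjm : j < m := List.mem_range.mp hj
        have hz : Nat.testBit 1 (m - j) = false := by
          apply Nat.testBit_lt_two_pow
          have h1j : 1 ≤ m - j := by omega
          calc 1 < 2 ^ 1 := by norm_num
          _ ≤ 2 ^ (m - j) := Nat.pow_le_pow_right (by norm_num) h1j
        have hmj : m + 1 - 1 - j = m - j := by omega
        rw [hmj, hz]
        rfl
      rw [List.map_congr_left h1m]
      have : (List.range m).map (fun _ => '0') = List.replicate m '0' := by
        simp
      rw [this]
      simp [Nat.testBit_zero]
    · rw [pvBin]
      rw [dif_neg hlt]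
      have hlen : pvZfill (m + 1) (pvBin (i / 2) ++ [if i % 2 = 1 then '1' else '0'])
          = pvZfill m (pvBin (i / 2)) ++ [if i % 2 = 1 then '1' else '0'] := by
        unfold pvZfill
        rw [List.length_append]
        simp only [List.length_singleton]
        have : m + 1 - ((pvBin (i / 2)).length + 1) = m - (pvBin (i / 2)).length := by omega
        rw [this, List.append_assoc]
      rw [hlen, ih (i / 2) (by omega) (by
        have : 2 ^ (m + 1) = 2 ^ m * 2 := by rw [pow_succ]
        omega)]
      unfold binN
      rw [List.range_succ, List.map_append]
      congr 1
      · apply List.map_congr_left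
        intro j hj
        have hjm : j < m := List.mem_range.mp hj
        have harith : m + 1 - 1 - j = (m - 1 - j) + 1 := by omega
        rw [harith, Nat.testBit_add_one]
      · simp only [List.map_cons, List.map_nil]
        have : m + 1 - 1 - m = 0 := by omega
        rw [this, Nat.testBit_zero]
        by_cases hm : i % 2 = 1 <;> simp [hm]

lemma natSub_congr {α : Type} : ∀ (xs : List α) (i i' : Nat),
    (∀ j < xs.length, i.testBit j = i'.testBit j) → natSub i xs = natSub i' xs := by
  intro xs
  induction xs with
  | nil => intro i i' _; rfl
  | cons x xs ih =>
    intro i i' h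
    rw [natSub_cons, natSub_cons, h xs.length (by simp), ih i i' (fun j hj => h j (by simp; omega))]

lemma fold_bits {α : Type} (i : Nat) (d : α) : ∀ (items : List α) (acc : List α),
    (List.range items.length).foldl
      (fun sub j => if i.testBit (items.length - 1 - j) then sub ++ [items.getD j d] else sub) acc
    = acc ++ natSub i items := by
  intro items
  induction items with
  | nil => intro acc; simp [natSub_nil]
  | cons x xs ih =>
    intro acc
    rw [List.length_cons, List.range_succ_eq_map, List.foldl_cons, List.foldl_map]
    have hfun : ∀ (sub : List α) (j : Nat),
        (if i.testBit (xs.length + 1 - 1 - Nat.succ j) then sub ++ [(x :: xs).getD (Nat.succ j) d] else sub)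
        = (if i.testBit (xs.length - 1 - j) then sub ++ [xs.getD j d] else sub) := by
      intro sub j
      have : xs.length + 1 - 1 - Nat.succ j = xs.length - 1 - j := by omega
      rw [this]
      rfl
    simp only [hfun]
    have hinit : (if i.testBit (xs.length + 1 - 1 - 0) then acc ++ [(x :: xs).getD 0 d] else acc)
        = (if i.testBit xs.length then acc ++ [x] else acc) := by
      have : xs.length + 1 - 1 - 0 = xs.length := by omega
      rw [this]; rfl
    rw [hinit, ih, natSub_cons]
    by_cases hb : i.testBit xs.length <;> simp [hb]

lemma pvSubset_eq (items : List (List (String × Int))) (i : Nat)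
    (h1 : 1 ≤ i) (h2 : i < 2 ^ items.length) : pvSubset items i = natSub i items := by
  unfold pvSubset
  rw [binRep items.length i h1 h2]
  rw [PySem.List.foldl_congr_mem _ _
    (fun sub j => if i.testBit (items.length - 1 - j) then sub ++ [items.getD j []] else sub) _ ?_]
  · rw [fold_bits]; simp
  · intro acc j hj
    have hjm : j < items.length := List.mem_range.mp hj
    unfold binN
    rw [PySem.List.getD_map_range _ _ _ _ hjm]
    by_cases hb : i.testBit (items.length - 1 - j) <;> simp [hb]

lemma allsubs_eq {α : Type} : ∀ (items : List α),
    (List.range (2 ^ items.length)).map (fun i => natSub i items) = pvAllsubs items := by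
  intro items
  induction items with
  | nil => simp [pvAllsubs, natSub_nil, List.range_one]
  | cons x xs ih =>
    have hp : 2 ^ (x :: xs).length = 2 ^ xs.length + 2 ^ xs.length := by
      rw [List.length_cons, pow_succ]; omega
    rw [hp, List.range_add, List.map_append, List.map_map]
    show _ = pvAllsubs xs ++ (pvAllsubs xs).map (fun s => x :: s)
    congr 1
    · rw [← ih]
      apply List.map_congr_left
      intro i hi
      have hilt : i < 2 ^ xs.length := List.mem_range.mp hi
      show natSub i (x :: xs) = natSub i xs
      rw [natSub_cons, Nat.testBit_lt_two_pow hilt]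
      simp
    · rw [← ih, List.map_map]
      apply List.map_congr_left
      intro i hi
      have hilt : i < 2 ^ xs.length := List.mem_range.mp hi
      show natSub (2 ^ xs.length + i) (x :: xs) = x :: natSub i xs
      rw [natSub_cons, Nat.testBit_two_pow_add_eq, Nat.testBit_lt_two_pow hilt]
      simp only [Bool.not_false, if_pos]
      congr 1
      exact natSub_congr xs _ i (fun j hj => Nat.testBit_two_pow_add_gt hj i)

lemma wv_pair : ∀ (s : List (List (String × Int))) (a b : Int),
    s.foldl (fun acc item => (acc.1 + pvKey item "volumen", acc.2 + pvKey item "valor")) (a, b)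
    = (s.foldl (fun x it => x + pvKey it "volumen") a, s.foldl (fun x it => x + pvKey it "valor") b) := by
  intro s
  induction s with
  | nil => intro a b; rfl
  | cons x xs ih => intro a b; simp only [List.foldl_cons]; exact ih _ _

lemma wv_eq (s : List (List (String × Int))) : weight_and_value s = (wvol s, wval s) := by
  unfold weight_and_value wvol wval
  exact wv_pair s 0 0

lemma bruteA {α : Type} (cap : Int) (vol val : α → Int) (S : List α) :
    S.foldl (fun st s => if vol s ≤ cap then
        (if val s > st.1 then (val s, [s])
         else if val s = st.1 then (st.1, st.2 ++ [s]) else st)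
      else st) ((0:Int), ([] : List α))
    = (((S.filter (fun s => decide (vol s ≤ cap))).map val).foldl max 0,
       (S.filter (fun s => decide (vol s ≤ cap))).filter
         (fun s => val s == ((S.filter (fun s => decide (vol s ≤ cap))).map val).foldl max 0)) := by
  induction S using List.reverseRecOn with
  | nil => simp
  | append_singleton S s ih =>
    rw [List.foldl_append, List.foldl_cons, List.foldl_nil, ih]
    by_cases hc : vol s ≤ cap
    · simp only [List.filter_append, List.filter_cons, List.filter_nil, hc, decide_true,
        if_true, List.map_append, List.foldl_append, List.map_cons, List.map_nil,
        List.foldl_cons, List.foldl_nil]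
      set F := S.filter (fun s => decide (vol s ≤ cap)) with hF
      set b := (F.map val).foldl max 0 with hb
      by_cases h1 : val s > b
      · rw [if_pos h1]
        have hmax : max b (val s) = val s := by omega
        rw [hmax]
        have hnil : F.filter (fun x => val x == val s) = [] := by
          rw [List.filter_eq_nil_iff]
          intro a ha
          have hle : val a ≤ b := (PySem.List.le_foldl_max (F.map val) 0).2 (val a)
            (List.mem_map_of_mem ha)
          simp only [beq_iff_eq]
          omega
        simp [hnil]
      · rw [if_neg h1]
        by_cases h2 : val s = b
        · rw [if_pos h2]
          have hmax : max b (val s) = b := by omega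
          rw [hmax]
          simp [h2]
        · rw [if_neg h2]
          have hmax : max b (val s) = b := by omega
          rw [hmax]
          simp [h2]
    · simp [List.filter_append, hc]

theorem exhaustivo_eq (items : List (List (String × Int))) (capacity : Int) :
    exhaustivo items capacity = exhaustivo_alt items capacity := by
  have hpow : 1 ≤ 2 ^ items.length := Nat.one_le_two_pow
  set S := (List.range (2 ^ items.length - 1)).map (fun k => natSub (1 + k) items) with hS
  have hdrop : (pvAllsubs items).drop 1 = S := by
    rw [← allsubs_eq items]
    have h2n : 2 ^ items.length = 1 + (2 ^ items.length - 1) := by omega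
    rw [h2n, List.range_add, List.map_append, List.range_one]
    simp [hS, List.map_map, Function.comp_def]
  have hcast : ((2:Int) ^ items.length - 1).toNat = 2 ^ items.length - 1 := by
    have h1 : ((2:Int) ^ items.length) = ((2 ^ items.length : Nat) : Int) := by push_cast; ring
    rw [h1]; omega
  have hA : exhaustivo items capacity =
      (S.foldl (fun st s => if wvol s ≤ capacity then
          (if wval s > st.1 then (wval s, [s])
           else if wval s = st.1 then (st.1, st.2 ++ [s]) else st)
        else st) ((0:Int), [])).2 := by
    unfold exhaustivo
    rw [PySem.List.pyRange_one, hcast, List.foldl_map]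
    rw [PySem.List.foldl_congr_mem _ _
      (fun st (k : Nat) => (fun st s => if wvol s ≤ capacity then
          (if wval s > st.1 then (wval s, [s])
           else if wval s = st.1 then (st.1, st.2 ++ [s]) else st)
        else st) st (natSub (1 + k) items)) _ ?_]
    · conv_rhs => rw [hS, List.foldl_map]
    · intro st k hk
      have hk' : k < 2 ^ items.length - 1 := List.mem_range.mp hk
      have ht : ((1:Int) + (k:Int)).toNat = 1 + k := by omega
      simp only [ht, pvSubset_eq items (1 + k) (by omega) (by omega), wv_eq]
  have hB : exhaustivo_alt items capacity =
      ((S.filter (fun s => decide (wvol s ≤ capacity))).filter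
        (fun s => wval s == ((S.filter (fun s => decide (wvol s ≤ capacity))).map wval).foldl max 0)) := by
    unfold exhaustivo_alt
    rw [hdrop]
    have hfeas : S.foldl (fun acc s =>
          let vol := s.foldl (fun a it => a + pvKey it "volumen") 0
          let val := s.foldl (fun a it => a + pvKey it "valor") 0
          if vol ≤ capacity then acc ++ [(val, s)] else acc) []
        = (S.filter (fun s => decide (wvol s ≤ capacity))).map (fun s => (wval s, s)) := by
      rw [PySem.List.foldl_congr_mem _ _
        (fun acc s => if (fun s => decide (wvol s ≤ capacity)) s = true
          then acc ++ [(fun s => (wval s, s)) s] else acc) _ ?_]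
      · rw [PySem.List.foldl_append_if]; simp
      · intro acc s _
        simp only [wvol, wval]
        by_cases h : s.foldl (fun a it => a + pvKey it "volumen") 0 ≤ capacity <;> simp [h]
    simp only [hfeas, List.map_map, List.filter_map, Function.comp_def]
    simp
  rw [hA, hB, bruteA capacity wvol wval S]

-- ===== VERDICT (by name: the statement is the Claim_ definition above) =====
theorem exhaustivo_spec : Claim_equal_exhaustivo := by
  intro items capacity _ _
  unfold Spec_exhaustivo
  exact exhaustivo_eq items capacity
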